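-- pv_equiv track=rewrite | github.com/solma/com.sma | src/main/python/life/tax.py | generate_tax_brackets
-- ===== SOURCE A (Python) =====
-- def generate_tax_brackets(brackets_higher_bounds, rates):
--   assert len(brackets_higher_bounds) + 1 == len(rates)
--   brackets = []
--   lower_bound = 0
--   for i in range(len(brackets_higher_bounds)):
--     brackets.append((lower_bound, brackets_higher_bounds[i], rates[i]))
--     lower_bound = brackets_higher_bounds[i] + 1
--   brackets.append((lower_bound, 2 << 32, rates[-1]))
--   return brackets
-- ===== SOURCE B (Python) =====
-- def generate_tax_brackets(brackets_higher_bounds, rates):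
--   assert len(brackets_higher_bounds) + 1 == len(rates)
--   def build(lower, bounds, rs):
--     if not bounds:
--       return [(lower, 2 << 32, rs[0])]
--     head, *rest = bounds
--     return [(lower, head, rs[0])] + build(head + 1, rest, rs[1:])
--   return build(0, brackets_higher_bounds, rates)
-- ===== Notes on version B (the rewrite author's own statement) =====
-- stated objective: alternative
-- what changed: Replaces the indexed for-loop that threads a mutable lower_bound and appends a special final element by a recursive decomposition: a helper consumes the bounds and rates lists head-first, passing the next lower bound down the recursion, with the sentinel bracket as the base case.
import Mathlib
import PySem

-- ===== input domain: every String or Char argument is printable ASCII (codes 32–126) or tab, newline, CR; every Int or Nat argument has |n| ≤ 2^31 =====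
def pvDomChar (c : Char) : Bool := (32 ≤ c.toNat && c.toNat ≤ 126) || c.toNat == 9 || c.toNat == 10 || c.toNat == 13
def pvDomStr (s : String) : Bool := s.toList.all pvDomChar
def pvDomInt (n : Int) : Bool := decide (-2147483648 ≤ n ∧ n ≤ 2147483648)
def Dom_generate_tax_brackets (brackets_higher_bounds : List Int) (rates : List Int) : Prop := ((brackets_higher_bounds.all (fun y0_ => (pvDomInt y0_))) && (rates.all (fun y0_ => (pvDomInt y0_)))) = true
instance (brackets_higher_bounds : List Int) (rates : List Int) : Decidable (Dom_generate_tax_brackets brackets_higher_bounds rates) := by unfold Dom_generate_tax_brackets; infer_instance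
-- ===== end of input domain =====

-- B replaces A's indexed loop threading a mutable lower_bound (plus the special final
-- append) by a head-first recursion whose base case produces the sentinel bracket.

-- ===== PORT A =====
-- the 'for i in range(len(brackets_higher_bounds))' loop: walks the bounds with the
-- running index i into rates, threading (brackets, lower_bound)
def pvLoopA (rates : List Int) : List Int → Int → Int → List (Int × Int × Int) →
    List (Int × Int × Int) × Int
  | [], _, lower_bound, brackets => (brackets, lower_bound)
  | hb :: tb, i, lower_bound, brackets =>
      pvLoopA rates tb (i + 1) (hb + 1)
        (brackets ++ [(lower_bound, hb, PySem.List.pyGetD rates i 0)])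

def generate_tax_brackets (brackets_higher_bounds : List Int) (rates : List Int) :
    List (Int × Int × Int) :=
  -- the assert is Pre_generate_tax_brackets
  let st := pvLoopA rates brackets_higher_bounds 0 0 []
  st.1 ++ [(st.2, (2 : Int) <<< 32, PySem.List.pyGetD rates (-1) 0)]

-- ===== PORT B =====
-- the inner recursive 'build(lower, bounds, rs)'; rs[0] is total here via the default 0
-- (inside Pre_ rs is always nonempty, so the default is never used)
def pvBuild : Int → List Int → List Int → List (Int × Int × Int)
  | lower, [], rs => [(lower, (2 : Int) <<< 32, PySem.List.pyGetD rs 0 0)]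
  | lower, head :: rest, rs =>
      (lower, head, PySem.List.pyGetD rs 0 0) :: pvBuild (head + 1) rest (rs.drop 1)

def generate_tax_brackets_alt (brackets_higher_bounds : List Int) (rates : List Int) :
    List (Int × Int × Int) :=
  -- assert as in A (Pre_)
  pvBuild 0 brackets_higher_bounds rates

-- ===== PRECONDITION & SPEC =====
-- A's assert: len(brackets_higher_bounds) + 1 == len(rates); otherwise AssertionError.
def Pre_generate_tax_brackets (brackets_higher_bounds : List Int) (rates : List Int) : Prop :=
  brackets_higher_bounds.length + 1 = rates.length
instance (brackets_higher_bounds : List Int) (rates : List Int) :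
    Decidable (Pre_generate_tax_brackets brackets_higher_bounds rates) := by
  unfold Pre_generate_tax_brackets; infer_instance

def pvWitness_generate_tax_brackets : List Int × List Int := ([5, 10, 20], [1, 2, 3, 4])

def Spec_generate_tax_brackets (brackets_higher_bounds : List Int) (rates : List Int)
    (out : List (Int × Int × Int)) : Prop :=
  out = generate_tax_brackets_alt brackets_higher_bounds rates
instance (brackets_higher_bounds : List Int) (rates : List Int) (out : List (Int × Int × Int)) :
    Decidable (Spec_generate_tax_brackets brackets_higher_bounds rates out) := by
  unfold Spec_generate_tax_brackets; infer_instance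

-- ===== CLAIM (what is proved, stated in full; the proofs are below) =====
def Claim_equal_generate_tax_brackets : Prop := ∀ (brackets_higher_bounds : List Int) (rates : List Int), Dom_generate_tax_brackets brackets_higher_bounds rates → Pre_generate_tax_brackets brackets_higher_bounds rates → Spec_generate_tax_brackets brackets_higher_bounds rates (generate_tax_brackets brackets_higher_bounds rates)

-- ===== LEMMAS AND PROOFS =====

lemma drop_length_sub_one {α : Type} (xs : List α) (h : xs ≠ []) :
    xs.drop (xs.length - 1) = [xs.getLast h] := by
  induction xs with
  | nil => exact absurd rfl h
  | cons x t ih =>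
    cases t with
    | nil => simp
    | cons y u => simpa [List.getLast] using ih (by simp)

lemma pvLoopA_build (b : List Int) : ∀ (r : List Int) (i lb : Int)
    (acc : List (Int × Int × Int)), 0 ≤ i → i + b.length + 1 = r.length →
    (pvLoopA r b i lb acc).1 ++
      [((pvLoopA r b i lb acc).2, (2 : Int) <<< 32, PySem.List.pyGetD r (-1) 0)]
    = acc ++ pvBuild lb b (r.drop i.toNat) := by
  induction b with
  | nil =>
    intro r i lb acc hi hlen
    have hr : r ≠ [] := by intro h; simp [h] at hlen; omega
    have hi' : i.toNat = r.length - 1 := by simp at hlen; omega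
    rw [hi', drop_length_sub_one r hr, PySem.List.pyGetD_neg_one r 0 hr]
    simp [pvLoopA, pvBuild, PySem.List.pyGetD, PySem.List.pyGet?, PySem.List.pyIdx?]
  | cons hb tb ih =>
    intro r i lb acc hi hlen
    have hlt : i.toNat < r.length := by simp at hlen; omega
    have hdrop : r.drop i.toNat = r[i.toNat] :: r.drop (i.toNat + 1) :=
      List.drop_eq_getElem_cons hlt
    have hget : PySem.List.pyGetD r i 0 = r[i.toNat] :=
      PySem.List.pyGetD_eq_getElem r 0 hi (by omega)
    have hget0 : PySem.List.pyGetD (r[i.toNat] :: r.drop (i.toNat + 1)) 0 0 = r[i.toNat] := by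
      simp [PySem.List.pyGetD, PySem.List.pyGet?, PySem.List.pyIdx?, hlt]
    have hnat : (i + 1).toNat = i.toNat + 1 := by omega
    rw [pvLoopA, ih r (i + 1) (hb + 1) _ (by omega) (by simp at hlen ⊢; omega), hnat,
      hdrop, pvBuild, hget0, hget]
    simp

-- ===== VERDICT (by name: the statement is the Claim_ definition above) =====
theorem generate_tax_brackets_spec : Claim_equal_generate_tax_brackets := by
  intro b r _ hpre
  unfold Spec_generate_tax_brackets generate_tax_brackets generate_tax_brackets_alt
  unfold Pre_generate_tax_brackets at hpre
  have := pvLoopA_build b r 0 0 [] le_rfl (by push_cast [← hpre]; ring)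
  simpa using this
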